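-- pv_equiv track=rewrite | github.com/manas-17045/LeetcodeSolutions | Leetcode 2901-3000/2919/2919.py | minIncrementOperations
-- ===== SOURCE A (Python) =====
-- def minIncrementOperations(nums: list[int], k: int) -> int:
--     """
--     Calculates the minimum increment operations to make the array beautiful.
--     An array is beautiful if for every `i` from `0` to `n - 3`, at least one of `nums[i]`, `nums[i+1]`, or `nums[i+2]` is greater than or equal to `k`.
--
--     Args:
--         nums: A list of integers.
--         k: An integer threshold.
--     Returns:
--         The minimum number of increment operations required.
--     """
--     n = len(nums)
--
--     dpNext1 = 0
--     dpNext2 = 0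
--     dpNext3 = 0
--
--     for i in range(n - 1, -1, -1):
--
--         currentDp = 0
--
--         if i > n - 3:
--             currentDp = 0
--         else:
--             cost1 = max(0, k - nums[i])
--             option1 = cost1 + dpNext1
--
--             cost2 = max(0, k - nums[i + 1])
--             option2 = cost2 + dpNext2
--
--             cost3 = max(0, k - nums[i + 2])
--             option3 = cost3 + dpNext3
--
--             currentDp = min(option1, option2, option3)
--
--         dpNext3 = dpNext2
--         dpNext2 = dpNext1
--         dpNext1 = currentDp
--
--     return dpNext1
-- ===== SOURCE B (Python) =====
-- def minIncrementOperations(nums: list[int], k: int) -> int: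
--     # One uniform fold, right to left: g(s) = cost(head) + min of the g-values of
--     # the next three suffixes; the answer is the min of the last three g-values.
--     a = b = c = 0
--     for x in reversed(nums):
--         a, b, c = max(k - x, 0) + min(a, b, c), a, b
--     return min(a, b, c)
-- ===== Notes on version B (the rewrite author's own statement) =====
-- stated objective: simpler
-- what changed: A's index-based backward DP (range loop with an i > n-3 branch and three list reads per step) is replaced by a single branch-free fold over reversed(nums) that reads one element per step and keeps three rolling values, returning their minimum.
import Mathlib
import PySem

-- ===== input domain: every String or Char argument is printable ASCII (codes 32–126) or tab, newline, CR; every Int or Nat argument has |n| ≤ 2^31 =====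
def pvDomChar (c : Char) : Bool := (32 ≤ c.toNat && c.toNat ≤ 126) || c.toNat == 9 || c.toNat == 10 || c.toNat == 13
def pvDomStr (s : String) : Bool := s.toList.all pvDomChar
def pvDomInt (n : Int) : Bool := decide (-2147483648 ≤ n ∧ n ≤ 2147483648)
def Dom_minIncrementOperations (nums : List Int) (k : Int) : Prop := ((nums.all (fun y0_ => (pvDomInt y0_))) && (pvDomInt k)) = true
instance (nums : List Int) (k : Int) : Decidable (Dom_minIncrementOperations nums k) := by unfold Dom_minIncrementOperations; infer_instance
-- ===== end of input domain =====

-- B replaces A's index-based backward DP (branch on i > n-3, three array reads per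
-- step) by one uniform branch-free fold over reversed(nums) reading one element per
-- step, returning the min of the three rolling values (objective: simpler).

-- ===== PORT A =====
def minIncrementOperations (nums : List Int) (k : Int) : Int :=
  let n : Int := nums.length
  let s :=
    (PySem.List.pyRange (n - 1) (-1) (-1)).foldl
      (fun (st : Int × Int × Int) i =>
        let currentDp : Int :=
          if i > n - 3 then 0
          else
            let cost1 := max 0 (k - PySem.List.pyGetD nums i 0)
            let option1 := cost1 + st.1
            let cost2 := max 0 (k - PySem.List.pyGetD nums (i + 1) 0)
            let option2 := cost2 + st.2.1
            let cost3 := max 0 (k - PySem.List.pyGetD nums (i + 2) 0)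
            let option3 := cost3 + st.2.2
            min (min option1 option2) option3
        (currentDp, st.1, st.2.1))
      (0, 0, 0)
  s.1

-- ===== PORT B =====
def minIncrementOperations_alt (nums : List Int) (k : Int) : Int :=
  let s :=
    nums.reverse.foldl
      (fun (st : Int × Int × Int) x =>
        (max (k - x) 0 + min (min st.1 st.2.1) st.2.2, st.1, st.2.1))
      (0, 0, 0)
  min (min s.1 s.2.1) s.2.2

-- ===== PRECONDITION & SPEC =====
def Spec_minIncrementOperations (nums : List Int) (k : Int) (out : Int) : Prop := out = minIncrementOperations_alt nums k
instance (nums : List Int) (k : Int) (out : Int) : Decidable (Spec_minIncrementOperations nums k out) := by unfold Spec_minIncrementOperations; infer_instance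

-- ===== CLAIM (what is proved, stated in full; the proofs are below) =====
def Claim_equal_minIncrementOperations : Prop := ∀ (nums : List Int) (k : Int), Dom_minIncrementOperations nums k → Spec_minIncrementOperations nums k (minIncrementOperations nums k)

-- ===== LEMMAS AND PROOFS =====

-- g-recursion computed by B: state after a suffix s is (g s, g (tail s), g (tail² s))
def pvG (k : Int) : List Int → Int × Int × Int
  | [] => (0, 0, 0)
  | x :: l =>
    let s := pvG k l
    (max (k - x) 0 + min (min s.1 s.2.1) s.2.2, s.1, s.2.1)

-- A's dp value of a suffix, as a structural recursion
def pvD (k : Int) : List Int → Int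
  | [] => 0
  | [_] => 0
  | [_, _] => 0
  | x :: y :: z :: l =>
      min (min (max 0 (k - x) + pvD k (y :: z :: l))
               (max 0 (k - y) + pvD k (z :: l)))
          (max 0 (k - z) + pvD k l)

-- A's loop body, named so the invariant lemma can rewrite with it
def pvStepA (nums : List Int) (k : Int) (st : Int × Int × Int) (i : Int) : Int × Int × Int :=
  let currentDp : Int :=
    if i > (nums.length : Int) - 3 then 0
    else
      let cost1 := max 0 (k - PySem.List.pyGetD nums i 0)
      let option1 := cost1 + st.1
      let cost2 := max 0 (k - PySem.List.pyGetD nums (i + 1) 0)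
      let option2 := cost2 + st.2.1
      let cost3 := max 0 (k - PySem.List.pyGetD nums (i + 2) 0)
      let option3 := cost3 + st.2.2
      min (min option1 option2) option3
  (currentDp, st.1, st.2.1)

lemma pvD_short (k : Int) (l : List Int) (h : l.length < 3) : pvD k l = 0 := by
  match l with
  | [] => rfl
  | [_] => rfl
  | [_, _] => rfl
  | _ :: _ :: _ :: _ => simp at h; omega

lemma pvB_eq (nums : List Int) (k : Int) :
    minIncrementOperations_alt nums k =
      min (min (pvG k nums).1 (pvG k nums).2.1) (pvG k nums).2.2 := by
  have h : nums.reverse.foldl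
      (fun (st : Int × Int × Int) x =>
        (max (k - x) 0 + min (min st.1 st.2.1) st.2.2, st.1, st.2.1))
      (0, 0, 0) = pvG k nums := by
    rw [List.foldl_reverse]
    induction nums with
    | nil => rfl
    | cons x l ih => rw [List.foldr_cons, ih]; rfl
  unfold minIncrementOperations_alt
  rw [h]

lemma pvG_cons_fst (k x : Int) (l : List Int) :
    (pvG k (x :: l)).1 =
      max (k - x) 0 + min (min (pvG k l).1 (pvG k l).2.1) (pvG k l).2.2 := rfl

lemma pvG_cons_snd1 (k x : Int) (l : List Int) :
    (pvG k (x :: l)).2.1 = (pvG k l).1 := rfl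

lemma pvG_cons_snd2 (k x : Int) (l : List Int) :
    (pvG k (x :: l)).2.2 = (pvG k l).2.1 := rfl

lemma pvD_eq_min3 (k : Int) (l : List Int) :
    pvD k l = min (min (pvG k l).1 (pvG k l).2.1) (pvG k l).2.2 := by
  induction l using pvD.induct with
  | case1 => simp [pvD, pvG]
  | case2 x =>
      simp only [pvD, pvG]
      omega
  | case3 x y =>
      simp only [pvD, pvG]
      omega
  | case4 x y z l ih1 ih2 ih3 =>
      simp only [pvD, ih1, ih2, ih3, pvG_cons_fst, pvG_cons_snd1, pvG_cons_snd2]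
      rw [max_comm 0 (k - x), max_comm 0 (k - y), max_comm 0 (k - z)]

-- the loop invariant of A's backward pass
lemma pvA_loop (nums : List Int) (k : Int) :
    ∀ j : Nat, j ≤ nums.length →
      (PySem.List.pyRange ((j : Int) - 1) (-1) (-1)).foldl (pvStepA nums k)
        (pvD k (nums.drop j), pvD k (nums.drop (j + 1)), pvD k (nums.drop (j + 2)))
      = (pvD k nums, pvD k (nums.drop 1), pvD k (nums.drop 2)) := by
  intro j
  induction j with
  | zero =>
      intro _
      rw [PySem.List.pyRange_neg_one_eq_nil (by omega)]
      simp
  | succ j ih =>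
      intro hj
      rw [show ((j + 1 : Nat) : Int) - 1 = (j : Int) by push_cast; ring]
      rw [PySem.List.pyRange_neg_one_cons (by omega), List.foldl_cons]
      simp only [show j + 1 + 1 = j + 2 from rfl, show j + 1 + 2 = j + 3 from rfl]
      have hstep :
          pvStepA nums k
            (pvD k (nums.drop (j + 1)), pvD k (nums.drop (j + 2)), pvD k (nums.drop (j + 3)))
            (j : Int)
          = (pvD k (nums.drop j), pvD k (nums.drop (j + 1)), pvD k (nums.drop (j + 2))) := by
        simp only [pvStepA]
        by_cases h3 : (j : Int) > (nums.length : Int) - 3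
        · rw [if_pos h3]
          have h0 : pvD k (nums.drop j) = 0 :=
            pvD_short k _ (by simp; omega)
          rw [h0]
        · rw [if_neg h3]
          have hj2 : j + 2 < nums.length := by omega
          have e0 : nums.drop j = nums[j] :: nums.drop (j + 1) :=
            List.drop_eq_getElem_cons (by omega)
          have e1 : nums.drop (j + 1) = nums[j + 1] :: nums.drop (j + 2) :=
            List.drop_eq_getElem_cons (by omega)
          have e2 : nums.drop (j + 2) = nums[j + 2] :: nums.drop (j + 3) :=
            List.drop_eq_getElem_cons (by omega)
          have g0 : PySem.List.pyGetD nums (j : Int) 0 = nums[j] := by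
            rw [PySem.List.pyGetD_natCast, List.getD_eq_getElem?_getD,
              List.getElem?_eq_getElem (by omega)]
            rfl
          have g1 : PySem.List.pyGetD nums ((j : Int) + 1) 0 = nums[j + 1] := by
            rw [show ((j : Int) + 1) = ((j + 1 : Nat) : Int) by push_cast; ring,
              PySem.List.pyGetD_natCast, List.getD_eq_getElem?_getD,
              List.getElem?_eq_getElem (by omega)]
            rfl
          have g2 : PySem.List.pyGetD nums ((j : Int) + 2) 0 = nums[j + 2] := by
            rw [show ((j : Int) + 2) = ((j + 2 : Nat) : Int) by push_cast; ring,
              PySem.List.pyGetD_natCast, List.getD_eq_getElem?_getD,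
              List.getElem?_eq_getElem (by omega)]
            rfl
          have hD : pvD k (nums.drop j) =
              min (min (max 0 (k - nums[j]) + pvD k (nums.drop (j + 1)))
                       (max 0 (k - nums[j + 1]) + pvD k (nums.drop (j + 2))))
                  (max 0 (k - nums[j + 2]) + pvD k (nums.drop (j + 3))) := by
            rw [e0, e1, e2]
            simp only [pvD]
          rw [g0, g1, g2, hD]
      rw [hstep]
      exact ih (by omega)

lemma pvA_eq (nums : List Int) (k : Int) :
    minIncrementOperations nums k = pvD k nums := by
  have h := pvA_loop nums k nums.length le_rfl
  rw [List.drop_length, List.drop_eq_nil_of_le (by omega),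
    List.drop_eq_nil_of_le (by omega)] at h
  show (List.foldl (pvStepA nums k) (0, 0, 0)
      (PySem.List.pyRange ((nums.length : Int) - 1) (-1) (-1))).1 = pvD k nums
  simp only [pvD] at h
  rw [h]

-- ===== VERDICT (by name: the statement is the Claim_ definition above) =====
theorem minIncrementOperations_spec : Claim_equal_minIncrementOperations := by
  intro nums k _
  unfold Spec_minIncrementOperations
  rw [pvA_eq, pvB_eq, pvD_eq_min3]
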